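-- pv_equiv track=rewrite | github.com/kcaisley/frida | src/cells/intedigitate.py | interdigitate_indices
-- ===== SOURCE A (Python) =====
-- def interdigitate_indices(partitioned_weights):
--     # Number of effective capacitors
--     n_caps = len(partitioned_weights)
--     # Number of unit capacitors (total positions)
--     total_units = sum(len(sublist) for sublist in partitioned_weights)
--     # Track the next sub_idx to use for each main_idx
--     sub_indices = [0] * n_caps
--     # Output: list of lists, each with (main_idx, sub_idx)
--     result = []
--     # Continue until all units are placed
--     placed = 0
--     while placed < total_units:
--         this_round = []
--         for main_idx, sublist in enumerate(partitioned_weights):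
--             sub_idx = sub_indices[main_idx]
--             if sub_idx < len(sublist):
--                 this_round.append((main_idx, sub_idx))
--                 sub_indices[main_idx] += 1
--                 placed += 1
--         if this_round:
--             result.append(this_round)
--     return result
-- ===== SOURCE B (Python) =====
-- def interdigitate_indices(partitioned_weights):
--     # Transpose by scattering: one pass over capacitors; each capacitor i with
--     # k units appends (i, r) into pre-allocated round bucket r for r in 0..k-1.
--     max_len = max((len(s) for s in partitioned_weights), default=0)
--     rounds = [[] for _ in range(max_len)]
--     for main_idx, sublist in enumerate(partitioned_weights):
--         for sub_idx in range(len(sublist)):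
--             rounds[sub_idx].append((main_idx, sub_idx))
--     return rounds
-- ===== Notes on version B (the rewrite author's own statement) =====
-- stated objective: alternative
-- what changed: A builds the output round by round, rescanning all capacitors each round with per-capacitor cursors and a placed counter; B transposes the traversal: it pre-allocates max_len round buckets and makes a single pass over capacitors, scattering each unit (i, r) directly into bucket r.
import Mathlib
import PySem

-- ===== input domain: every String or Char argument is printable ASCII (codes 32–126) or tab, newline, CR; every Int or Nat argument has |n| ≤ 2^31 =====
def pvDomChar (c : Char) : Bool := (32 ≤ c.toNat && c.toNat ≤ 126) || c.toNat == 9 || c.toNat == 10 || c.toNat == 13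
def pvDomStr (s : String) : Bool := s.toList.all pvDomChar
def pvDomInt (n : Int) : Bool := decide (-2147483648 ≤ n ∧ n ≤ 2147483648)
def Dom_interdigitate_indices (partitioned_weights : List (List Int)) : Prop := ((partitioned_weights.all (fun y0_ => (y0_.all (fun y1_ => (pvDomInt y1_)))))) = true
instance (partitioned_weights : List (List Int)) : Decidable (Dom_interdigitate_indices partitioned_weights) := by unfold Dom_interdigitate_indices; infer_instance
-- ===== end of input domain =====

-- B replaces A's round-by-round rescans (per-cap cursors, placed counter) by a single
-- pass over capacitors scattering each unit into pre-allocated round buckets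
-- (objective: alternative, a transpose of the traversal).

-- ===== PORT A =====
-- inner `for main_idx, sublist in enumerate(partitioned_weights)` loop;
-- state (this_round, sub_indices, placed); list indexing/assignment are in range in A.
def interRound : List (List Int) → Nat → List Int → List (Int × Int) → Int →
    List (Int × Int) × List Int × Int
  | [], _, sub, tr, placed => (tr, sub, placed)
  | sl :: rest, i, sub, tr, placed =>
    let s := sub.getD i 0
    if s < (sl.length : Int) then
      interRound rest (i+1) (sub.set i (s+1)) (tr ++ [((i : Int), s)]) (placed + 1)
    else
      interRound rest (i+1) sub tr placed

-- `while placed < total_units` loop; fuel only makes the same computation total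
-- (Python performs at most total_units iterations, so fuel is never exhausted).
def interLoop (pw : List (List Int)) (total : Int) :
    Nat → List Int → Int → List (List (Int × Int)) → List (List (Int × Int))
  | 0, _, _, res => res
  | fuel+1, sub, placed, res =>
    if placed < total then
      match interRound pw 0 sub [] placed with
      | (tr, sub', placed') =>
        interLoop pw total fuel sub' placed' (if tr = [] then res else res ++ [tr])
    else res

def interdigitate_indices (partitioned_weights : List (List Int)) : List (List (Int × Int)) :=
  let n := partitioned_weights.length
  let total : Int := (partitioned_weights.map (fun sl => (sl.length : Int))).sum
  interLoop partitioned_weights total (total.toNat + 1) (List.replicate n 0) 0 []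

-- ===== PORT B =====
-- `for sub_idx in range(len(sublist)): rounds[sub_idx].append(...)`:
-- appends (i, r), (i, r+1), … into the first k buckets (in B all indices are in range).
def appendAll (i : Int) : Int → List (List (Int × Int)) → Nat → List (List (Int × Int))
  | _, rounds, 0 => rounds
  | _, [], _+1 => []
  | r, hd :: tl, k+1 => (hd ++ [(i, r)]) :: appendAll i (r+1) tl k

-- `for main_idx, sublist in enumerate(partitioned_weights)` loop
def scatterAll : List (List Int) → Nat → List (List (Int × Int)) → List (List (Int × Int))
  | [], _, rounds => rounds
  | s :: rest, i, rounds => scatterAll rest (i+1) (appendAll (i : Int) 0 rounds s.length)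

def interdigitate_indices_alt (partitioned_weights : List (List Int)) : List (List (Int × Int)) :=
  -- max((len(s) for s in pw), default=0): lengths are Nats, so this is foldl max 0
  let maxLen := (partitioned_weights.map List.length).foldl max 0
  scatterAll partitioned_weights 0 (List.replicate maxLen [])

-- ===== PRECONDITION & SPEC =====
def Spec_interdigitate_indices (partitioned_weights : List (List Int)) (out : List (List (Int × Int))) : Prop := out = interdigitate_indices_alt partitioned_weights
instance (partitioned_weights : List (List Int)) (out : List (List (Int × Int))) : Decidable (Spec_interdigitate_indices partitioned_weights out) := by unfold Spec_interdigitate_indices; infer_instance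

-- ===== CLAIM (what is proved, stated in full; the proofs are below) =====
def Claim_equal_interdigitate_indices : Prop := ∀ (partitioned_weights : List (List Int)), Dom_interdigitate_indices partitioned_weights → Spec_interdigitate_indices partitioned_weights (interdigitate_indices partitioned_weights)

-- ===== LEMMAS AND PROOFS =====

-- indices of capacitors still active in round r
def activeAt (L : List Nat) (r : Nat) : List Nat :=
  (List.range L.length).filter (fun i => decide (r < L.getD i 0))

def roundAt (L : List Nat) (r : Nat) : List (Int × Int) :=
  (activeAt L r).map (fun (j : Nat) => ((j : Int), (r : Int)))

-- what A's this_round computes, in A's traversal order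
def roundPartL : List Nat → Nat → Nat → List (Int × Int)
  | [], _, _ => []
  | l :: ls, i, r => (if r < l then [((i : Int), (r : Int))] else []) ++ roundPartL ls (i+1) r

-- the common result from round r on
def specFrom (L : List Nat) (r : Nat) : Nat → List (List (Int × Int))
  | 0 => []
  | f+1 => if activeAt L r = [] then [] else roundAt L r :: specFrom L (r+1) f

def sumMin (L : List Nat) (r : Nat) : Nat := (L.map (fun l => min r l)).sum

theorem getD_at (pre : List Int) (x : Int) (t : List Int) :
    (pre ++ x :: t).getD pre.length 0 = x := by
  induction pre with
  | nil => simp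
  | cons a pre _ => simp

theorem set_at (pre : List Int) (x v : Int) (t : List Int) :
    (pre ++ x :: t).set pre.length v = pre ++ v :: t := by
  induction pre with
  | nil => simp
  | cons a pre _ => simp

def gmin (r : Nat) (sl : List Int) : Int := ((min r sl.length : Nat) : Int)

theorem interRound_spec (r : Nat) :
    ∀ (rest : List (List Int)) (pre : List Int) (tr : List (Int × Int)) (placed : Int),
    interRound rest pre.length (pre ++ rest.map (gmin r)) tr placed
    = (tr ++ roundPartL (rest.map List.length) pre.length r,
       pre ++ rest.map (gmin (r+1)),
       placed + ((rest.filter (fun sl => decide (r < sl.length))).length : Int)) := by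
  intro rest
  induction rest with
  | nil => intro pre tr placed; simp [interRound, roundPartL]
  | cons sl rest ih =>
    intro pre tr placed
    by_cases h : r < sl.length
    · have hg : gmin r sl = (r : Int) := by simp [gmin]; omega
      have hg1 : gmin (r+1) sl = (r : Int) + 1 := by simp [gmin]; omega
      have hcond : gmin r sl < (sl.length : Int) := by rw [hg]; exact_mod_cast h
      have hsub : pre ++ (gmin r sl + 1) :: rest.map (gmin r)
          = (pre ++ [gmin r sl + 1]) ++ rest.map (gmin r) := by simp
      have hlen : pre.length + 1 = (pre ++ [gmin r sl + 1]).length := by simp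
      simp only [interRound, List.map_cons, getD_at, if_pos hcond, set_at, hsub, hlen, ih]
      simp only [roundPartL, List.filter_cons, hg, hg1, Prod.mk.injEq]
      refine ⟨by simp [h], by simp, ?_⟩
      simp [h]
      ring
    · have hg : gmin r sl = (sl.length : Int) := by simp [gmin]; omega
      have hg1 : gmin (r+1) sl = gmin r sl := by simp [gmin]; omega
      have hcond : ¬ gmin r sl < (sl.length : Int) := by rw [hg]; omega
      have hsub : pre ++ gmin r sl :: rest.map (gmin r)
          = (pre ++ [gmin r sl]) ++ rest.map (gmin r) := by simp
      have hlen : pre.length + 1 = (pre ++ [gmin r sl]).length := by simp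
      simp only [interRound, List.map_cons, hsub, hlen, ih]
      simp only [roundPartL, List.filter_cons, hg1]
      simp [h]
      intro hc
      exact absurd hc hcond

-- cons decomposition of activeAt
theorem activeAt_cons (l : Nat) (ls : List Nat) (r : Nat) :
    activeAt (l :: ls) r
    = (if r < l then [0] else []) ++ (activeAt ls r).map (· + 1) := by
  simp only [activeAt, List.length_cons, List.range_succ_eq_map, List.filter_cons,
    List.getD_cons_zero, List.filter_map]
  by_cases h : r < l <;> simp [h, Function.comp_def] <;> rfl

theorem activeAt_nil_iff (L : List Nat) (r : Nat) :
    activeAt L r = [] ↔ ∀ l ∈ L, l ≤ r := by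
  induction L with
  | nil => simp [activeAt]
  | cons l ls ih =>
    rw [activeAt_cons]
    constructor
    · intro h
      rcases List.append_eq_nil_iff.mp h with ⟨h1, h2⟩
      intro x hx
      rcases List.mem_cons.mp hx with rfl | hx
      · by_contra hc; simp [if_pos (by omega : r < x)] at h1
      · exact ih.mp (by simpa using h2) x hx
    · intro h
      have h1 : ¬ r < l := by have := h l (by simp); omega
      have h2 : activeAt ls r = [] := ih.mpr (fun x hx => h x (by simp [hx]))
      simp [h1, h2]

theorem roundPartL_eq (r : Nat) :
    ∀ (L : List Nat) (i : Nat),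
    roundPartL L i r = (activeAt L r).map (fun j => (((j + i : Nat) : Int), (r : Int))) := by
  intro L
  induction L with
  | nil => intro i; simp [roundPartL, activeAt]
  | cons l ls ih =>
    intro i
    rw [roundPartL, activeAt_cons, ih (i+1)]
    split_ifs with h <;> simp [List.map_map, Function.comp_def] <;> intro a _ <;> omega

theorem sumMin_le (L : List Nat) (r : Nat) : sumMin L r ≤ L.sum := by
  induction L with
  | nil => simp [sumMin]
  | cons l ls ih => simp only [sumMin, List.map_cons, List.sum_cons] at *; omega

theorem sumMin_lt_iff (L : List Nat) (r : Nat) :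
    sumMin L r < L.sum ↔ ∃ l ∈ L, r < l := by
  induction L with
  | nil => simp [sumMin]
  | cons l ls ih =>
    have hle := sumMin_le ls r
    have hstep : sumMin (l :: ls) r = min r l + sumMin ls r := by simp [sumMin]
    rw [hstep, List.sum_cons]
    constructor
    · intro h
      by_cases hl : r < l
      · exact ⟨l, by simp, hl⟩
      · have h2 : sumMin ls r < ls.sum := by omega
        rcases ih.mp h2 with ⟨x, hx, hrx⟩
        exact ⟨x, by simp [hx], hrx⟩
    · rintro ⟨x, hx, hrx⟩
      rcases List.mem_cons.mp hx with rfl | hx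
      · omega
      · have h2 := ih.mpr ⟨x, hx, hrx⟩
        have hml : min r l ≤ l := by omega
        omega

theorem sumMin_succ (L : List Nat) (r : Nat) :
    sumMin L (r+1) = sumMin L r + (L.filter (fun l => decide (r < l))).length := by
  induction L with
  | nil => simp [sumMin]
  | cons l ls ih =>
    simp only [sumMin, List.map_cons, List.sum_cons, List.filter_cons] at *
    by_cases h : r < l
    · simp [h]; omega
    · simp [h]; omega

theorem cnt_eq (pw : List (List Int)) (r : Nat) :
    ((pw.map List.length).filter (fun l => decide (r < l))).length
    = (pw.filter (fun sl => decide (r < sl.length))).length := by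
  rw [List.filter_map, List.length_map]
  rfl

-- A's loop computes specFrom
theorem interLoop_spec (pw : List (List Int)) :
    ∀ (f r : Nat) (res : List (List (Int × Int))),
    interLoop pw (((pw.map List.length).sum : Nat) : Int) f (pw.map (gmin r))
      ((sumMin (pw.map List.length) r : Nat) : Int) res
    = res ++ specFrom (pw.map List.length) r f := by
  intro f
  induction f with
  | zero => intro r res; simp [interLoop, specFrom]
  | succ f ih =>
    intro r res
    set L := pw.map List.length with hL
    rw [interLoop, specFrom]
    by_cases h : activeAt L r = []
    · have hle : ∀ l ∈ L, l ≤ r := (activeAt_nil_iff L r).mp h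
      have : ¬ sumMin L r < L.sum := by
        intro hc
        rcases (sumMin_lt_iff L r).mp hc with ⟨x, hx, hrx⟩
        have := hle x hx; omega
      rw [if_neg (by exact_mod_cast this), if_pos h]
      simp
    · have hex : ∃ l ∈ L, r < l := by
        by_contra hc
        refine h ((activeAt_nil_iff L r).mpr (fun l hl => ?_))
        by_contra hc2
        exact hc ⟨l, hl, by omega⟩
      have hlt : sumMin L r < L.sum := (sumMin_lt_iff L r).mpr hex
      rw [if_pos (by exact_mod_cast hlt)]
      have hspec := interRound_spec r pw [] [] ((sumMin L r : Nat) : Int)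
      simp only [List.length_nil, List.nil_append] at hspec
      have htr : roundPartL L 0 r = roundAt L r := by
        rw [roundPartL_eq, roundAt]
        apply List.map_congr_left
        intro a _
        simp
      have htrne : roundPartL L 0 r ≠ [] := by
        rw [htr, roundAt]
        simp only [ne_eq, List.map_eq_nil_iff]
        exact h
      have hplaced : ((sumMin L r : Nat) : Int) + ((pw.filter (fun sl => decide (r < sl.length))).length : Int)
          = ((sumMin L (r+1) : Nat) : Int) := by
        rw [sumMin_succ, hL, cnt_eq]
        push_cast
        ring
      rw [hspec]
      dsimp only
      rw [hplaced, if_neg htrne, ih (r+1), if_neg h, htr]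
      simp

theorem replicate_eq_gmin0 (pw : List (List Int)) :
    List.replicate pw.length (0 : Int) = pw.map (gmin 0) := by
  induction pw with
  | nil => simp
  | cons sl rest ih =>
    simp only [List.length_cons, List.replicate_succ, List.map_cons]
    rw [ih]
    simp [gmin]

theorem total_cast (pw : List (List Int)) :
    (pw.map (fun sl => (sl.length : Int))).sum = (((pw.map List.length).sum : Nat) : Int) := by
  induction pw with
  | nil => simp
  | cons sl rest ih => simp [ih]

theorem sumMin_zero (L : List Nat) : sumMin L 0 = 0 := by
  induction L with
  | nil => rfl
  | cons l ls ih => simp [sumMin] at ih ⊢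

-- ===== B-side lemmas =====

theorem appendAll_length (i : Int) :
    ∀ (rounds : List (List (Int × Int))) (k : Nat) (r : Int),
    (appendAll i r rounds k).length = rounds.length := by
  intro rounds
  induction rounds with
  | nil => intro k r; cases k <;> simp [appendAll]
  | cons hd tl ih =>
    intro k r
    cases k with
    | zero => simp [appendAll]
    | succ k => simp [appendAll, ih]

theorem appendAll_getD (i : Int) :
    ∀ (rounds : List (List (Int × Int))) (k : Nat) (r : Int) (t : Nat),
    k ≤ rounds.length →
    (appendAll i r rounds k).getD t []
    = rounds.getD t [] ++ (if t < k then [(i, r + (t : Int))] else []) := by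
  intro rounds
  induction rounds with
  | nil =>
    intro k r t hk
    have hk0 : k = 0 := by simpa using hk
    subst hk0
    simp [appendAll]
  | cons hd tl ih =>
    intro k r t hk
    cases k with
    | zero => simp [appendAll]
    | succ k =>
      cases t with
      | zero => simp [appendAll]
      | succ t =>
        have hk' : k ≤ tl.length := by simpa using hk
        show (appendAll i (r+1) tl k).getD t [] = _
        rw [ih k (r+1) t hk']
        simp only [List.getD_cons_succ]
        congr 1
        by_cases h : t < k
        · rw [if_pos h, if_pos (by omega : t + 1 < k + 1)]
          congr 2
          push_cast
          ring
        · rw [if_neg h, if_neg (by omega : ¬ t + 1 < k + 1)]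

theorem map_getD_range (rounds : List (List (Int × Int))) :
    (List.range rounds.length).map (fun t => rounds.getD t []) = rounds := by
  induction rounds with
  | nil => simp
  | cons hd tl ih =>
    simp only [List.length_cons, List.range_succ_eq_map, List.map_cons, List.map_map,
      List.getD_cons_zero, Function.comp_def, List.getD_cons_succ]
    rw [ih]

theorem scatterAll_spec :
    ∀ (rest : List (List Int)) (i : Nat) (rounds : List (List (Int × Int))),
    (∀ s ∈ rest, s.length ≤ rounds.length) →
    scatterAll rest i rounds
    = (List.range rounds.length).map
        (fun r => rounds.getD r [] ++ roundPartL (rest.map List.length) i r) := by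
  intro rest
  induction rest with
  | nil =>
    intro i rounds _
    simp only [List.map_nil, roundPartL, List.append_nil]
    exact (map_getD_range rounds).symm
  | cons s rest ih =>
    intro i rounds hlen
    rw [scatterAll]
    have hsl : s.length ≤ rounds.length := hlen s (by simp)
    have hlen' : ∀ s' ∈ rest, s'.length ≤ (appendAll (i : Int) 0 rounds s.length).length := by
      intro s' hs'
      rw [appendAll_length]
      exact hlen s' (by simp [hs'])
    rw [ih (i+1) _ hlen', appendAll_length]
    apply List.map_congr_left
    intro r hr
    have hrlt : r < rounds.length := List.mem_range.mp hr
    rw [appendAll_getD i rounds s.length 0 r hsl]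
    simp only [List.map_cons, roundPartL, zero_add, List.append_assoc]

theorem foldl_max_le : ∀ (L : List Nat) (a r : Nat),
    L.foldl max a ≤ r ↔ a ≤ r ∧ ∀ l ∈ L, l ≤ r := by
  intro L
  induction L with
  | nil => intro a r; simp
  | cons l ls ih =>
    intro a r
    simp only [List.foldl_cons, ih, List.mem_cons]
    constructor
    · rintro ⟨h1, h2⟩
      exact ⟨by omega, fun x hx => by rcases hx with rfl | hx; omega; exact h2 x hx⟩
    · rintro ⟨h1, h2⟩
      exact ⟨by have := h2 l (Or.inl rfl); omega, fun x hx => h2 x (Or.inr hx)⟩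

theorem le_sum_of_mem : ∀ (L : List Nat) (l : Nat), l ∈ L → l ≤ L.sum := by
  intro L
  induction L with
  | nil => intro l h; simp at h
  | cons x xs ih =>
    intro l h
    rcases List.mem_cons.mp h with rfl | h
    · simp
    · have := ih l h; simp; omega

theorem specFrom_eq (L : List Nat) :
    ∀ (f r : Nat), L.foldl max 0 ≤ r + f →
    specFrom L r f
    = (List.range (L.foldl max 0 - r)).map (fun k => roundAt L (r + k)) := by
  intro f
  induction f with
  | zero =>
    intro r h
    have : L.foldl max 0 - r = 0 := by omega
    simp [specFrom, this]
  | succ f ih =>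
    intro r h
    rw [specFrom]
    by_cases hA : activeAt L r = []
    · have hle : ∀ l ∈ L, l ≤ r := (activeAt_nil_iff L r).mp hA
      have hm : L.foldl max 0 ≤ r := (foldl_max_le L 0 r).mpr ⟨by omega, hle⟩
      have : L.foldl max 0 - r = 0 := by omega
      simp [hA, this]
    · have hm : ¬ L.foldl max 0 ≤ r := by
        intro hc
        exact hA ((activeAt_nil_iff L r).mpr
          (fun l hl => le_trans (((foldl_max_le L 0 (L.foldl max 0)).mp le_rfl).2 l hl) hc))
      have hd : L.foldl max 0 - r = (L.foldl max 0 - (r+1)) + 1 := by omega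
      rw [if_neg hA, ih (r+1) (by omega), hd, List.range_succ_eq_map]
      simp only [List.map_cons, List.map_map, Function.comp_def]
      congr 1
      apply List.map_congr_left
      intro k _
      congr 1
      omega

-- ===== VERDICT (by name: the statement is the Claim_ definition above) =====
theorem interdigitate_indices_spec : Claim_equal_interdigitate_indices := by
  intro pw _
  unfold Spec_interdigitate_indices
  simp only [interdigitate_indices, interdigitate_indices_alt]
  set L := pw.map List.length with hL
  set m := L.foldl max 0 with hm
  -- B side
  have hlen : ∀ s ∈ pw, s.length ≤ (List.replicate m ([] : List (Int × Int))).length := by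
    intro s hs
    rw [List.length_replicate]
    have : s.length ∈ L := by rw [hL]; exact List.mem_map_of_mem hs
    exact le_trans (le_refl _) (by
      have := (foldl_max_le L 0 m).mp le_rfl
      exact this.2 s.length ‹s.length ∈ L›)
  have hB : scatterAll pw 0 (List.replicate m ([] : List (Int × Int)))
      = (List.range m).map (fun r => roundAt L r) := by
    rw [scatterAll_spec pw 0 _ hlen, List.length_replicate]
    apply List.map_congr_left
    intro r hr
    have : (List.replicate m ([] : List (Int × Int))).getD r [] = [] := by
      simp [List.getD, List.mem_range.mp hr]
    rw [this, List.nil_append, roundPartL_eq, roundAt]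
    apply List.map_congr_left
    intro a _
    simp
  -- A side
  rw [replicate_eq_gmin0, total_cast]
  have hz : ((sumMin L 0 : Nat) : Int) = 0 := by rw [sumMin_zero]; rfl
  have hmain := interLoop_spec pw (L.sum + 1) 0 []
  rw [hz] at hmain
  simp only [Int.toNat_natCast, ← hL]
  rw [hmain, hB]
  have hms : m ≤ L.sum := by
    by_cases hLnil : L = []
    · simp [hm, hLnil]
    · rcases List.exists_mem_of_ne_nil L hLnil with ⟨x, hx⟩
      have hall : ∀ l ∈ L, l ≤ L.sum := fun l hl => le_sum_of_mem L l hl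
      exact (foldl_max_le L 0 L.sum).mpr ⟨by omega, hall⟩
  have := specFrom_eq L (L.sum + 1) 0 (by omega)
  simp only [Nat.sub_zero, zero_add, ← hm] at this
  rw [this]
  simp
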